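-- pv_equiv track=rewrite | github.com/BertieJing/AssessPy | Assess/AssessAlign.py | align_score
-- ===== SOURCE A (Python) =====
-- def align_score(seq_one, seq_two):
--     matches = 0
--     mismatches = 0
--     gap = 0
--     for i in range(min(len(seq_one), len(seq_two))):
--         if (seq_one[i].lower() == seq_two[i].lower()) and (seq_one[i] != "-" and seq_two[i] != "-"):
--             matches += 1
--         elif seq_one[i] == "-" or seq_two[i] == "-":
--             gap += 1
--         else:
--             mismatches += 1
--     return matches, mismatches, gap
-- ===== SOURCE B (Python) =====
-- def align_score(seq_one, seq_two):
--     pairs = list(zip(seq_one, seq_two))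
--     gap = sum(1 for a, b in pairs if a == "-" or b == "-")
--     matches = sum(1 for a, b in pairs
--                   if a != "-" and b != "-" and a.lower() == b.lower())
--     mismatches = len(pairs) - matches - gap
--     return matches, mismatches, gap
-- ===== Notes on version B (the rewrite author's own statement) =====
-- stated objective: alternative
-- what changed: Replaces the single indexed loop with a three-branch if/elif/else by a zip of the two sequences, two independent predicate counts (gaps, case-folded matches), and mismatches obtained by complementary subtraction from the truncated length.
import Mathlib
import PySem

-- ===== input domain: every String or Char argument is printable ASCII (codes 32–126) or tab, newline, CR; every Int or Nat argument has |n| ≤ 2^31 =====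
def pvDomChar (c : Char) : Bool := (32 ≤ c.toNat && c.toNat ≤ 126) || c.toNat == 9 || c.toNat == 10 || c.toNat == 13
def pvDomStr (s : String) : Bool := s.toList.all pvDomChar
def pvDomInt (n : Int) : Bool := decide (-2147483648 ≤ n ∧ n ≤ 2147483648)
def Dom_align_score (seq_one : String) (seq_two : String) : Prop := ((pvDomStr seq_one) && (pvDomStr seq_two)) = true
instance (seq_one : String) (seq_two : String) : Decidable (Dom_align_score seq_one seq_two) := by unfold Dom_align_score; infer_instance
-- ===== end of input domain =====

-- B replaces A's indexed loop with three-way branching by a zip plus two predicate counts,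
-- deriving mismatches by complementary subtraction (objective: alternative decomposition).


-- ===== PORT A =====
-- A's loop body: the three-way branch on seq_one[i], seq_two[i]; state = (matches, mismatches, gap)
def alignStepA (l1 l2 : List Char) (st : Int × Int × Int) (i : Nat) : Int × Int × Int :=
  let c1 := l1.getD i ' '   -- i < min length inside the loop, so the default is never used
  let c2 := l2.getD i ' '
  if PySem.Chars.lowerChar c1 = PySem.Chars.lowerChar c2 ∧ (c1 ≠ '-' ∧ c2 ≠ '-') then
    (st.1 + 1, st.2.1, st.2.2)
  else if c1 = '-' ∨ c2 = '-' then
    (st.1, st.2.1, st.2.2 + 1)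
  else
    (st.1, st.2.1 + 1, st.2.2)

def align_score (seq_one : String) (seq_two : String) : Int × Int × Int :=
  let l1 := seq_one.toList
  let l2 := seq_two.toList
  (List.range (min l1.length l2.length)).foldl (alignStepA l1 l2) (0, 0, 0)

-- ===== PORT B =====
-- B's two generator conditions, named (Source B writes them inline in the two sums)
def pvGapP (p : Char × Char) : Bool := p.1 == '-' || p.2 == '-'

def pvMatchP (p : Char × Char) : Bool :=
  p.1 != '-' && p.2 != '-' && PySem.Chars.lowerChar p.1 == PySem.Chars.lowerChar p.2

def align_score_alt (seq_one : String) (seq_two : String) : Int × Int × Int :=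
  let pairs := seq_one.toList.zip seq_two.toList
  let gap : Int := pairs.countP pvGapP
  let mtch : Int := pairs.countP pvMatchP
  (mtch, (pairs.length : Int) - mtch - gap, gap)

-- ===== PRECONDITION & SPEC =====
def Spec_align_score (seq_one : String) (seq_two : String) (out : Int × Int × Int) : Prop := out = align_score_alt seq_one seq_two
instance (seq_one : String) (seq_two : String) (out : Int × Int × Int) : Decidable (Spec_align_score seq_one seq_two out) := by unfold Spec_align_score; infer_instance

-- ===== CLAIM (what is proved, stated in full; the proofs are below) =====
def Claim_equal_align_score : Prop := ∀ (seq_one : String) (seq_two : String), Dom_align_score seq_one seq_two → Spec_align_score seq_one seq_two (align_score seq_one seq_two)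

-- ===== LEMMAS AND PROOFS =====

-- A's else-branch condition, on a pair
def pvMismP (p : Char × Char) : Bool := !(pvMatchP p) && !(pvGapP p)

-- A's fold, expressed on the zipped lists with a general initial state.
theorem alignFold_eq (l1 : List Char) : ∀ (l2 : List Char) (init : Int × Int × Int),
    (List.range (min l1.length l2.length)).foldl (alignStepA l1 l2) init
      = (init.1 + ((l1.zip l2).countP pvMatchP : Int),
         init.2.1 + ((l1.zip l2).countP pvMismP : Int),
         init.2.2 + ((l1.zip l2).countP pvGapP : Int)) := by
  induction l1 with
  | nil => intro l2 init; simp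
  | cons a t1 ih =>
    intro l2 init
    cases l2 with
    | nil => simp
    | cons b t2 =>
      have hshift : (fun (st : Int × Int × Int) i => alignStepA (a :: t1) (b :: t2) st (i + 1))
          = alignStepA t1 t2 := by
        funext st i
        simp [alignStepA]
      have hrange : List.range (min (a :: t1).length (b :: t2).length)
          = 0 :: (List.range (min t1.length t2.length)).map (· + 1) := by
        simp [List.length_cons, Nat.succ_min_succ, List.range_succ_eq_map]
      rw [hrange]
      simp only [List.foldl_cons, List.foldl_map]
      rw [hshift, ih]
      have hstep : alignStepA (a :: t1) (b :: t2) init 0 =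
          if PySem.Chars.lowerChar a = PySem.Chars.lowerChar b ∧ (a ≠ '-' ∧ b ≠ '-') then
            (init.1 + 1, init.2.1, init.2.2)
          else if a = '-' ∨ b = '-' then (init.1, init.2.1, init.2.2 + 1)
          else (init.1, init.2.1 + 1, init.2.2) := rfl
      rw [hstep]
      by_cases hm : PySem.Chars.lowerChar a = PySem.Chars.lowerChar b ∧ (a ≠ '-' ∧ b ≠ '-')
      · have h1 : pvMatchP (a, b) = true := by simp [pvMatchP]; tauto
        have h2 : pvGapP (a, b) = false := by simp [pvGapP]; tauto
        have h3 : pvMismP (a, b) = false := by simp [pvMismP, h1]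
        simp [hm, List.zip_cons_cons, h1, h2, h3]; omega
      · by_cases hg : a = '-' ∨ b = '-'
        · have h1 : pvMatchP (a, b) = false := by simp [pvMatchP]; tauto
          have h2 : pvGapP (a, b) = true := by simp [pvGapP]; tauto
          have h3 : pvMismP (a, b) = false := by simp [pvMismP, h2]
          simp [hm, hg, List.zip_cons_cons, h1, h2, h3]; omega
        · have h1 : pvMatchP (a, b) = false := by simp [pvMatchP]; tauto
          have h2 : pvGapP (a, b) = false := by simp [pvGapP]; tauto
          have h3 : pvMismP (a, b) = true := by simp [pvMismP, h1, h2]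
          simp [hm, hg, List.zip_cons_cons, h1, h2, h3]; omega

-- the three predicates partition each pair, so the counts sum to the zip length
theorem count_partition (l : List (Char × Char)) :
    l.countP pvMatchP + l.countP pvMismP + l.countP pvGapP = l.length := by
  induction l with
  | nil => simp
  | cons p t ih =>
    obtain ⟨x, y⟩ := p
    by_cases hm : pvMatchP (x, y) = true
    · have hg : pvGapP (x, y) = false := by
        simp [pvMatchP] at hm; simp [pvGapP]; tauto
      have hx : pvMismP (x, y) = false := by simp [pvMismP, hm]
      simp [hm, hg, hx]; omega
    · have hm' : pvMatchP (x, y) = false := by simpa using hm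
      by_cases hg : pvGapP (x, y) = true
      · have hx : pvMismP (x, y) = false := by simp [pvMismP, hg]
        simp [hm', hg, hx]; omega
      · have hg' : pvGapP (x, y) = false := by simpa using hg
        have hx : pvMismP (x, y) = true := by simp [pvMismP, hm', hg']
        simp [hm', hg', hx]; omega

-- ===== VERDICT (by name: the statement is the Claim_ definition above) =====
theorem align_score_spec : Claim_equal_align_score := by
  intro s t _
  unfold Spec_align_score align_score align_score_alt
  rw [alignFold_eq]
  have h := count_partition (s.toList.zip t.toList)
  simp only [List.length_zip, String.length_toList] at h
  refine Prod.ext ?_ (Prod.ext ?_ ?_) <;> simp <;> omega
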